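-- pv_equiv track=rewrite | github.com/KevinBort/Codeacademy_projects | Hurricane Analysis - Dictionaries/Functions.py | count_areas
-- ===== SOURCE A (Python) =====
-- def count_areas(areas_affected):
--
--     dict={}
--     new=[]
--     for i in areas_affected:
--         for x in i:
--             new.append(x)
--         for x in new:
--             dict[x]=new.count(x)
--
--     return dict
-- ===== SOURCE B (Python) =====
-- def count_areas(areas_affected):
--     counts = {}
--     for sub in areas_affected:
--         for x in sub:
--             counts[x] = counts.get(x, 0) + 1
--     return counts
-- ===== Notes on version B (the rewrite author's own statement) =====
-- stated objective: faster
-- what changed: Replaces A's growing flattened list with repeated full rescans (dict[x]=new.count(x) over the whole accumulated list each outer iteration) by a single accumulating pass that increments counts[x] once per element.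
import Mathlib
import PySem

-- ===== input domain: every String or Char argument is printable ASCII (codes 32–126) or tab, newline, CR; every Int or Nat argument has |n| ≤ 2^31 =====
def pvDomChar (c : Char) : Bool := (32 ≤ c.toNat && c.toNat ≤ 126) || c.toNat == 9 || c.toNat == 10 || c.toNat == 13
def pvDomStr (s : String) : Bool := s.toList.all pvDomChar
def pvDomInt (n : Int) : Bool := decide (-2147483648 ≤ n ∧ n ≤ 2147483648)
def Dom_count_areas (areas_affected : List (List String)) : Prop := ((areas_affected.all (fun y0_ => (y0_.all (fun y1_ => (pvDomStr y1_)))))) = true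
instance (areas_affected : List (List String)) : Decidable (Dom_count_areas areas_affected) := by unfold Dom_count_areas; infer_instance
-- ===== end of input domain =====

-- B replaces A's quadratic rescans of a growing flattened list by one single accumulating counting pass.

-- ===== PORT A =====
-- A keeps a dict and an accumulator list `new`; each outer iteration appends the sublist
-- to `new` and then re-assigns dict[x] = new.count(x) for every x of the whole `new`.
def count_areas (areas_affected : List (List String)) : List (String × Int) :=
  (areas_affected.foldl
    (fun (st : PySem.Dict String Int × List String) i =>
      let new := i.foldl (fun new x => new ++ [x]) st.2
      let d := new.foldl (fun d x => d.insert x ((PySem.List.count new x : Int))) st.1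
      (d, new))
    (PySem.Dict.empty, [])).1.items

-- ===== PORT B =====
-- single pass: counts[x] = counts.get(x, 0) + 1 for each element, visited once
def count_areas_alt (areas_affected : List (List String)) : List (String × Int) :=
  (areas_affected.foldl
    (fun (d : PySem.Dict String Int) sub =>
      sub.foldl (fun d x => d.insert x (d.getD x 0 + 1)) d)
    PySem.Dict.empty).items

-- ===== PRECONDITION & SPEC =====
def Spec_count_areas (areas_affected : List (List String)) (out : List (String × Int)) : Prop := out = count_areas_alt areas_affected
instance (areas_affected : List (List String)) (out : List (String × Int)) : Decidable (Spec_count_areas areas_affected out) := by unfold Spec_count_areas; infer_instance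

-- ===== CLAIM (what is proved, stated in full; the proofs are below) =====
def Claim_equal_count_areas : Prop := ∀ (areas_affected : List (List String)), Dom_count_areas areas_affected → Spec_count_areas areas_affected (count_areas areas_affected)

-- ===== LEMMAS AND PROOFS =====

-- a fold inserting each key x with a value c x depending only on x: last write wins
theorem getD_foldl_insert_const (c : String → Int) (l : List String) (d : PySem.Dict String Int) (k : String) :
    (l.foldl (fun d x => d.insert x (c x)) d).getD k 0 =
      if k ∈ l then c k else d.getD k 0 := by
  induction l generalizing d with
  | nil => simp
  | cons h t ih =>
    simp only [List.foldl_cons, ih, List.mem_cons]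
    by_cases hkt : k ∈ t
    · simp [hkt]
    · simp [hkt, PySem.Dict.getD_insert]
      by_cases hk : k = h <;> simp [hk]

-- updating a set with elements it already has is a no-op
theorem update_self_noop (L : List String) :
    PySem.Set.update (PySem.Set.ofList L) L = PySem.Set.ofList L := by
  rw [PySem.Set.update_eq_append_filter]
  simp

-- A's inner re-counting pass over new = L₀ ++ s, starting from counter L₀, yields counter (L₀ ++ s)
theorem recount_step (L₀ s : List String) (d : PySem.Dict String Int)
    (hk : d.keys = PySem.Set.ofList L₀) :
    ((L₀ ++ s).foldl (fun d x => d.insert x ((PySem.List.count (L₀ ++ s) x : Int))) d)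
      = PySem.Dict.counter (L₀ ++ s) := by
  set L := L₀ ++ s with hL
  have hkeys : (L.foldl (fun d x => d.insert x ((PySem.List.count L x : Int))) d).keys
      = PySem.Set.ofList L := by
    rw [PySem.Dict.keys_foldl_insert L (fun _ x => ((PySem.List.count L x : Int))) d, hk]
    rw [hL, PySem.Set.ofList_append, PySem.Set.update_append, update_self_noop]
  have hnd : (L.foldl (fun d x => d.insert x ((PySem.List.count L x : Int))) d).keys.Nodup := by
    rw [hkeys]; exact PySem.Set.nodup_ofList L
  apply PySem.Dict.ext
  rw [PySem.Dict.items_eq_map_keys _ hnd 0,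
      PySem.Dict.items_eq_map_keys (PySem.Dict.counter L) (PySem.Dict.nodup_keys_counter L) 0,
      hkeys, PySem.Dict.keys_counter]
  apply List.map_congr_left
  intro k hkmem
  have hkL : k ∈ L := (PySem.List.mem_dedup L k).mp hkmem
  rw [getD_foldl_insert_const, if_pos hkL, PySem.Dict.getD_counter, PySem.List.count_eq]

-- A's whole loop: state after processing l from (counter L₀, L₀) is (counter (L₀ ++ flatten l), …)
theorem countA_invariant (l : List (List String)) (L₀ : List String) :
    (l.foldl
      (fun (st : PySem.Dict String Int × List String) i =>
        let new := i.foldl (fun new x => new ++ [x]) st.2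
        let d := new.foldl (fun d x => d.insert x ((PySem.List.count new x : Int))) st.1
        (d, new))
      (PySem.Dict.counter L₀, L₀))
      = (PySem.Dict.counter (L₀ ++ l.flatten), L₀ ++ l.flatten) := by
  induction l generalizing L₀ with
  | nil => simp
  | cons i t ih =>
    simp only [List.foldl_cons]
    have hnew : i.foldl (fun new x => new ++ [x]) L₀ = L₀ ++ i :=
      PySem.List.foldl_append_singleton i L₀
    rw [hnew, recount_step L₀ i _ (PySem.Dict.keys_counter L₀), ih (L₀ ++ i)]
    simp

-- B's nested loop is the counter of the flattened list
theorem countB_eq_counter (l : List (List String)) :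
    (l.foldl
      (fun (d : PySem.Dict String Int) sub =>
        sub.foldl (fun d x => d.insert x (d.getD x 0 + 1)) d)
      PySem.Dict.empty)
      = PySem.Dict.counter l.flatten := by
  rw [← PySem.Dict.foldl_insert_getD_add_one_eq_counter, List.foldl_flatten]

-- ===== VERDICT (by name: the statement is the Claim_ definition above) =====
theorem count_areas_spec : Claim_equal_count_areas := by
  intro areas _
  unfold Spec_count_areas count_areas count_areas_alt
  rw [countB_eq_counter]
  have h0 : (PySem.Dict.empty : PySem.Dict String Int) = PySem.Dict.counter [] := rfl
  rw [h0, countA_invariant areas []]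
  simp
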